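-- pv_equiv track=rewrite | github.com/suraj1ly/AI-Vs-2048 | Project/Main_Project/QLearning.py | push_left
-- ===== SOURCE A (Python) =====
-- import copy
--
-- def push_left(bb):
--     s = 0
--     s1 = 0
--
--     b = copy.deepcopy(bb)
--     b_new = copy.deepcopy(bb)
--
--     for i in [0, 1, 2, 3]:
--         l = []
--         for j in [0, 1, 2, 3]:
--             l.append(b[i][j])
--
--         l = list(filter((0).__ne__, l))
--
--         l_n = []
--         while len(l) > 1:
--             if l[0] == l[1] and l[0] != 0:
--                 l_n.append(2 * l[0])
--                 s = s + (2 * l[0])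
--                 s1 = s1 + 1
--                 l.pop(0)
--                 l.pop(0)
--
--             else:
--                 l_n.append(l[0])
--                 l.pop(0)
--         if len(l) == 1:
--             l_n.append(l[0])
--             l.pop(0)
--
--         for k in range(4 - len(l_n)):
--             l_n.append(0)
--
--         for j in range(0, 4):
--             b_new[i][j] = l_n[j]
--
--     return b_new, s, s1
-- ===== SOURCE B (Python) =====
-- def _merge_line(line):
--     tiles = [v for v in line if v != 0]
--     out = []
--     score = 0
--     merges = 0
--     i = 0
--     while i < len(tiles):
--         if i + 1 < len(tiles) and tiles[i] == tiles[i + 1]: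
--             out.append(2 * tiles[i])
--             score += 2 * tiles[i]
--             merges += 1
--             i += 2
--         else:
--             out.append(tiles[i])
--             i += 1
--     out.extend([0] * (4 - len(out)))
--     return out, score, merges
--
--
-- def push_left(bb):
--     b_new = [list(row) for row in bb]
--     s = 0
--     s1 = 0
--     for i in range(4):
--         merged, score, merges = _merge_line(b_new[i][:4])
--         b_new[i][:4] = merged
--         s += score
--         s1 += merges
--     return b_new, s, s1
-- ===== Notes on version B (the rewrite author's own statement) =====
-- stated objective: simpler
-- what changed: Replaces A's deepcopy + pop-front while-loop with a per-line helper that compresses the line, makes one index-advancing forward pass pairing adjacent equal tiles, pads to 4, and writes each merged line back into a plain row-copied board by slice assignment; Pre_ excludes boards with fewer than 4 rows or a short row among the first 4, on which A raises IndexError.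
import Mathlib
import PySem

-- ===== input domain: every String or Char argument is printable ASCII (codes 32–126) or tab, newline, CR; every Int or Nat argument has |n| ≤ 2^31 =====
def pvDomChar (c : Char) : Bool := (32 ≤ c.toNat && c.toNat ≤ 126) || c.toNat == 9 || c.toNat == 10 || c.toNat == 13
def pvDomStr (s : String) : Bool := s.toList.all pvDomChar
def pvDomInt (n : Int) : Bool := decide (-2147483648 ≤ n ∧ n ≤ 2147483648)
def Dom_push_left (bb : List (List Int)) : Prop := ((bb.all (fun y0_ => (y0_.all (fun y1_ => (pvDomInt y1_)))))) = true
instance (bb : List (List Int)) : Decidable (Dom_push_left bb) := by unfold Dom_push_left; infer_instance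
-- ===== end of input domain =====

-- B restructures A's deepcopy + pop-front while-loop into a per-line forward merge pass
-- written back by slice assignment; neither mutates its argument, return values are proved equal.

-- ===== PORT A =====
-- A's `while len(l) > 1` loop plus the trailing `if len(l) == 1` append, threading l_n, s, s1.
def pushLoopA : List Int → List Int → Int → Int → List Int × Int × Int
  | x :: y :: rest, l_n, s, s1 =>
      if x = y ∧ x ≠ 0 then pushLoopA rest (l_n ++ [2 * x]) (s + 2 * x) (s1 + 1)
      else pushLoopA (y :: rest) (l_n ++ [x]) s s1
  | [x], l_n, s, s1 => (l_n ++ [x], s, s1)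
  | [], l_n, s, s1 => (l_n, s, s1)

-- The body of A's `for i in [0, 1, 2, 3]` loop.  deepcopy is the identity on the value;
-- the indices i, j are the literal constants 0..3 (nonnegative, in range on Pre_), so
-- getD/set is exact for Python's b[i][j] reads and b_new[i][j] writes.
def pushBodyA (b : List (List Int)) (acc : List (List Int) × Int × Int) (i : Nat) :
    List (List Int) × Int × Int :=
  let b_new := acc.1
  let s := acc.2.1
  let s1 := acc.2.2
  let l := (List.range 4).foldl (fun l j => l ++ [(b.getD i []).getD j 0]) []
  let l := l.filter (fun v => decide (v ≠ 0))
  let r := pushLoopA l [] s s1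
  let l_n := r.1 ++ List.replicate (4 - r.1.length) 0
  let row := (List.range 4).foldl (fun rw j => rw.set j (l_n.getD j 0)) (b_new.getD i [])
  (b_new.set i row, r.2.1, r.2.2)

def push_left (bb : List (List Int)) : List (List Int) × Int × Int :=
  (List.range 4).foldl (pushBodyA bb) (bb, 0, 0)

-- ===== PORT B =====
-- B's `while i < len(tiles)` forward pass; `fuel` only bounds the iteration count (i
-- strictly increases, so tiles.length iterations suffice) — the loop condition
-- `i < tiles.length` is still what decides each step, exactly as in Python.
def mergePassB (tiles : List Int) : Nat → Nat → List Int → Int → Int → List Int × Int × Int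
  | 0, _, out, score, merges => (out, score, merges)
  | fuel + 1, i, out, score, merges =>
    if i < tiles.length then
      if i + 1 < tiles.length ∧ tiles.getD i 0 = tiles.getD (i + 1) 0 then
        mergePassB tiles fuel (i + 2) (out ++ [2 * tiles.getD i 0])
          (score + 2 * tiles.getD i 0) (merges + 1)
      else
        mergePassB tiles fuel (i + 1) (out ++ [tiles.getD i 0]) score merges
    else (out, score, merges)

def mergeLineB (line : List Int) : List Int × Int × Int :=
  let tiles := line.filter (fun v => decide (v ≠ 0))
  let r := mergePassB tiles tiles.length 0 [] 0 0
  (r.1 ++ List.replicate (4 - r.1.length) 0, r.2.1, r.2.2)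

-- `list(row)` copies a row (identity on the value); `b_new[i][:4]` is `take 4` and the
-- slice assignment `b_new[i][:4] = merged` replaces that prefix: `merged ++ row.drop 4`.
def push_left_alt (bb : List (List Int)) : List (List Int) × Int × Int :=
  (List.range 4).foldl (fun acc i =>
      let row := acc.1.getD i []
      let m := mergeLineB (row.take 4)
      (acc.1.set i (m.1 ++ row.drop 4), acc.2.1 + m.2.1, acc.2.2 + m.2.2))
    (bb.map (fun row => row), 0, 0)

-- ===== PRECONDITION & SPEC =====
-- Pre_ is exactly the inputs on which the Python A returns: boards with at least 4 rows whose
-- first 4 rows each have at least 4 entries (otherwise b[i][j] raises IndexError).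
def Pre_push_left (bb : List (List Int)) : Prop :=
  4 ≤ bb.length ∧ ∀ row ∈ bb.take 4, 4 ≤ row.length
instance (bb : List (List Int)) : Decidable (Pre_push_left bb) := by
  unfold Pre_push_left; infer_instance

def pvWitness_push_left : List (List Int) :=
  [[2, 2, 0, 2], [0, 0, 0, 0], [4, 4, 4, 4], [2, 0, 2, 8]]

def Spec_push_left (bb : List (List Int)) (out : List (List Int) × Int × Int) : Prop :=
  out = push_left_alt bb
instance (bb : List (List Int)) (out : List (List Int) × Int × Int) :
    Decidable (Spec_push_left bb out) := by unfold Spec_push_left; infer_instance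

-- ===== CLAIM (what is proved, stated in full; the proofs are below) =====
def Claim_equal_push_left : Prop :=
  ∀ (bb : List (List Int)), Dom_push_left bb → Pre_push_left bb →
    Spec_push_left bb (push_left bb)

-- ===== LEMMAS AND PROOFS =====

-- A's accumulators factor out of its merge loop.
lemma pushLoopA_accum :
    ∀ n (l : List Int), l.length ≤ n → ∀ out s s1, pushLoopA l out s s1 =
      (out ++ (pushLoopA l [] 0 0).1, s + (pushLoopA l [] 0 0).2.1,
        s1 + (pushLoopA l [] 0 0).2.2) := by
  intro n
  induction n with
  | zero =>
    intro l hl out s s1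
    match l, hl with
    | [], _ => simp [pushLoopA]
  | succ n ih =>
    intro l hl out s s1
    match l with
    | [] => simp [pushLoopA]
    | [x] => simp [pushLoopA]
    | x :: y :: rest =>
      simp only [List.length_cons] at hl
      by_cases h : x = y ∧ x ≠ 0
      · simp only [pushLoopA, if_pos h]
        rw [ih rest (by omega) (out ++ [2 * x]) (s + 2 * x) (s1 + 1),
            ih rest (by omega) ([] ++ [2 * x]) (0 + 2 * x) (0 + 1)]
        simp [List.append_assoc, add_assoc]
      · simp only [pushLoopA, if_neg h]
        rw [ih (y :: rest) (by simp; omega) (out ++ [x]) s s1,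
            ih (y :: rest) (by simp; omega) ([] ++ [x]) 0 0]
        simp [List.append_assoc]

-- The merged line is never longer than its input.
lemma pushLoopA_len :
    ∀ n (l : List Int), l.length ≤ n → ∀ out s s1,
      (pushLoopA l out s s1).1.length ≤ out.length + l.length := by
  intro n
  induction n with
  | zero =>
    intro l hl out s s1
    match l, hl with
    | [], _ => simp [pushLoopA]
  | succ n ih =>
    intro l hl out s s1
    match l with
    | [] => simp [pushLoopA]
    | [x] => simp [pushLoopA]
    | x :: y :: rest =>
      simp only [List.length_cons] at hl
      by_cases h : x = y ∧ x ≠ 0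
      · simp only [pushLoopA, if_pos h]
        have := ih rest (by omega) (out ++ [2 * x]) (s + 2 * x) (s1 + 1)
        simp at this ⊢; omega
      · simp only [pushLoopA, if_neg h]
        have := ih (y :: rest) (by simp; omega) (out ++ [x]) s s1
        simp at this ⊢; omega

lemma accum' (l out : List Int) (s s1 : Int) : pushLoopA l out s s1 =
    (out ++ (pushLoopA l [] 0 0).1, s + (pushLoopA l [] 0 0).2.1,
      s1 + (pushLoopA l [] 0 0).2.2) :=
  pushLoopA_accum l.length l le_rfl out s s1

lemma len' (l : List Int) : (pushLoopA l [] 0 0).1.length ≤ l.length := by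
  simpa using pushLoopA_len l.length l le_rfl [] 0 0

-- Reading the padded merged line back entry by entry (A's write-back loop) rebuilds it.
lemma pad_cons (p : List Int) (hp : p.length ≤ 4) (t : List Int) :
    (p ++ List.replicate (4 - p.length) 0).getD 0 0 ::
    (p ++ List.replicate (4 - p.length) 0).getD 1 0 ::
    (p ++ List.replicate (4 - p.length) 0).getD 2 0 ::
    (p ++ List.replicate (4 - p.length) 0).getD 3 0 :: t =
    (p ++ List.replicate (4 - p.length) 0) ++ t := by
  match p, hp with
  | [], _ => rfl
  | [w], _ => rfl
  | [w, x], _ => rfl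
  | [w, x, y], _ => rfl
  | [w, x, y, z], _ => rfl

-- B's index pass over `tiles` from position i is A's pop-front loop on `tiles.drop i`,
-- provided no zero is left among the tiles and the fuel covers the remaining positions.
lemma mergePass_eq_pushLoop (tiles : List Int) (hz : (0 : Int) ∉ tiles) :
    ∀ fuel i out s s1, tiles.length - i ≤ fuel →
      mergePassB tiles fuel i out s s1 = pushLoopA (tiles.drop i) out s s1 := by
  intro fuel
  induction fuel with
  | zero =>
    intro i out s s1 hf
    have hd : tiles.drop i = [] := List.drop_eq_nil_of_le (by omega)
    simp [mergePassB, hd, pushLoopA]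
  | succ fuel ih =>
    intro i out s s1 hf
    by_cases hi : i < tiles.length
    · have hx : tiles.drop i = tiles[i] :: tiles.drop (i + 1) :=
        List.drop_eq_getElem_cons hi
      have hxz : tiles[i] ≠ 0 := by
        intro h0; exact hz (h0 ▸ List.getElem_mem hi)
      by_cases hc : i + 1 < tiles.length ∧ tiles.getD i 0 = tiles.getD (i + 1) 0
      · obtain ⟨hi1, heq⟩ := hc
        have hy : tiles.drop (i + 1) = tiles[i + 1] :: tiles.drop (i + 2) :=
          List.drop_eq_getElem_cons hi1
        have hgi : tiles.getD i 0 = tiles[i] := List.getD_eq_getElem _ _ hi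
        have hgi1 : tiles.getD (i + 1) 0 = tiles[i + 1] := List.getD_eq_getElem _ _ hi1
        rw [mergePassB, if_pos hi, if_pos ⟨hi1, heq⟩, ih (i + 2) _ _ _ (by omega),
            hx, hy, pushLoopA, if_pos ⟨by rw [← hgi, ← hgi1, heq], hgi ▸ hxz⟩, hgi]
      · have hgi : tiles.getD i 0 = tiles[i] := List.getD_eq_getElem _ _ hi
        rw [mergePassB, if_pos hi, if_neg hc, ih (i + 1) _ _ _ (by omega), hx]
        rcases hy : tiles.drop (i + 1) with _ | ⟨y, rest⟩
        · rw [pushLoopA, hgi, pushLoopA]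
        · have hi1 : i + 1 < tiles.length := by
            by_contra hge
            rw [List.drop_eq_nil_of_le (by omega)] at hy; exact absurd hy (by simp)
          have hgi1 : tiles.getD (i + 1) 0 = tiles[i + 1] := List.getD_eq_getElem _ _ hi1
          have hyv : y = tiles[i + 1] := by
            have := List.drop_eq_getElem_cons hi1
            rw [hy] at this; exact (List.cons.injEq _ _ _ _ ▸ this).1
          rw [pushLoopA, if_neg ?_, hgi]
          intro ⟨hab, _⟩
          exact hc ⟨hi1, by rw [hgi, hgi1, ← hyv, hab]⟩
    · rw [mergePassB, if_neg hi, List.drop_eq_nil_of_le (by omega), pushLoopA]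

-- A's pop-front loop on the compressed first four entries of a row, as B computes it.
def lineOf (row : List Int) : List Int × Int × Int :=
  pushLoopA ((row.take 4).filter (fun v => decide (v ≠ 0))) [] 0 0

lemma mergeLineB_eq (row : List Int) : mergeLineB (row.take 4) =
    ((lineOf row).1 ++ List.replicate (4 - (lineOf row).1.length) 0,
      (lineOf row).2.1, (lineOf row).2.2) := by
  have hz : (0 : Int) ∉ (row.take 4).filter (fun v => decide (v ≠ 0)) := by simp
  have h := mergePass_eq_pushLoop ((row.take 4).filter (fun v => decide (v ≠ 0))) hz
    ((row.take 4).filter (fun v => decide (v ≠ 0))).length 0 [] 0 0 (Nat.sub_le _ _)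
  simp only [mergeLineB, lineOf, h, List.drop_zero]

-- One iteration of A's outer loop: replace row i by its merged line and add its score/merges.
lemma stepA_char (b bnew : List (List Int)) (s s1 : Int) (i : Nat) (row : List Int)
    (hb : b.getD i [] = row) (hbn : bnew.getD i [] = row) (hlen : 4 ≤ row.length) :
    pushBodyA b (bnew, s, s1) i =
      (bnew.set i ((lineOf row).1 ++ List.replicate (4 - (lineOf row).1.length) 0 ++ row.drop 4),
        s + (lineOf row).2.1, s1 + (lineOf row).2.2) := by
  rcases row with _ | ⟨a, row⟩; · simp only [List.length_nil] at hlen; omega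
  rcases row with _ | ⟨b', row⟩; · simp only [List.length_cons, List.length_nil] at hlen; omega
  rcases row with _ | ⟨c, row⟩; · simp only [List.length_cons, List.length_nil] at hlen; omega
  rcases row with _ | ⟨d, t⟩; · simp only [List.length_cons, List.length_nil] at hlen; omega
  simp only [List.getD] at hb hbn
  simp only [pushBodyA, hb, hbn, show List.range 4 = [0, 1, 2, 3] from rfl,
    List.foldl_cons, List.foldl_nil, List.getD, List.getElem?_cons_zero,
    List.getElem?_cons_succ, Option.getD_some, List.nil_append, List.set, lineOf,
    List.take_succ_cons, List.take_zero,
    show ([a] ++ [b'] ++ [c] ++ [d] : List Int) = [a, b', c, d] from rfl]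
  rw [accum' ([a, b', c, d].filter (fun v => decide (v ≠ 0))) [] s s1]
  have hlen4 : (pushLoopA ([a, b', c, d].filter (fun v => decide (v ≠ 0))) [] 0 0).1.length ≤ 4 := by
    have h1 := len' ([a, b', c, d].filter (fun v => decide (v ≠ 0)))
    have h2 := List.length_filter_le (fun v => decide (v ≠ 0)) [a, b', c, d]
    simp only [List.length_cons, List.length_nil] at h2; omega
  have hpad := pad_cons (pushLoopA ([a, b', c, d].filter (fun v => decide (v ≠ 0))) [] 0 0).1 hlen4 t
  simp only [List.getD, List.nil_append,
    show List.drop 4 (a :: b' :: c :: d :: t) = t from rfl] at hpad ⊢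
  rw [hpad, List.append_assoc]

-- ===== VERDICT (by name: the statement is the Claim_ definition above) =====
theorem push_left_spec : Claim_equal_push_left := by
  intro bb _ hpre
  obtain ⟨hlen, hrows⟩ := hpre
  unfold Spec_push_left
  rcases bb with _ | ⟨r0, bb⟩; · simp at hlen
  rcases bb with _ | ⟨r1, bb⟩; · simp at hlen
  rcases bb with _ | ⟨r2, bb⟩; · simp only [List.length_cons, List.length_nil] at hlen; omega
  rcases bb with _ | ⟨r3, rest⟩; · simp only [List.length_cons, List.length_nil] at hlen; omega
  have h0 : 4 ≤ r0.length := hrows r0 (by simp)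
  have h1 : 4 ≤ r1.length := hrows r1 (by simp [List.take])
  have h2 : 4 ≤ r2.length := hrows r2 (by simp [List.take])
  have h3 : 4 ≤ r3.length := hrows r3 (by simp [List.take])
  simp only [push_left, show List.range 4 = [0, 1, 2, 3] from rfl, List.foldl_cons,
    List.foldl_nil]
  rw [stepA_char _ _ _ _ 0 r0 rfl rfl h0]
  rw [stepA_char _ _ _ _ 1 r1 rfl (by simp [List.getD, List.set]) h1]
  rw [stepA_char _ _ _ _ 2 r2 rfl (by simp [List.getD, List.set]) h2]
  rw [stepA_char _ _ _ _ 3 r3 rfl (by simp [List.getD, List.set]) h3]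
  simp [push_left_alt, mergeLineB_eq, List.set, List.getD, List.append_assoc,
    show List.range 4 = [0, 1, 2, 3] from rfl]
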